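-- pv_equiv track=rewrite | github.com/Meghanasveeramallu/SI-Primary | Power Game.py | f
-- ===== SOURCE A (Python) =====
-- def f(a,b,n):
--     a.sort()
--     b.sort()
--     c=0
--     i=n-1
--     j=i
--     while(i>=0 and j>=0):
--         if (a[i]>b[j]):
--             c+=1
--             i-=1
--         j-=1
--
--     return c
-- ===== SOURCE B (Python) =====
-- def f(a, b, n):
--     # Hall-style closed form: wins = min(n, min over t of (#a's > b[t]) + t),
--     # with the count found by binary search on the sorted a.
--     a.sort()
--     b.sort()
--     if n <= 0:
--         return 0
--     best = n
--     for t in range(n):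
--         bt = b[t]
--         lo, hi = 0, n
--         while lo < hi:
--             mid = (lo + hi) // 2
--             if a[mid] <= bt:
--                 lo = mid + 1
--             else:
--                 hi = mid
--         cnt = n - lo
--         if cnt + t < best:
--             best = cnt + t
--     return best
-- ===== Notes on version B (the rewrite author's own statement) =====
-- stated objective: alternative
-- what changed: Replaces A's descending two-pointer matching sweep with a Hall-theorem closed form: after sorting, the answer is min(n, min over t of (count of a-elements greater than b[t]) + t), each count obtained by a hand-written binary search; there is no pointer/matching sweep at all.
import Mathlib
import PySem

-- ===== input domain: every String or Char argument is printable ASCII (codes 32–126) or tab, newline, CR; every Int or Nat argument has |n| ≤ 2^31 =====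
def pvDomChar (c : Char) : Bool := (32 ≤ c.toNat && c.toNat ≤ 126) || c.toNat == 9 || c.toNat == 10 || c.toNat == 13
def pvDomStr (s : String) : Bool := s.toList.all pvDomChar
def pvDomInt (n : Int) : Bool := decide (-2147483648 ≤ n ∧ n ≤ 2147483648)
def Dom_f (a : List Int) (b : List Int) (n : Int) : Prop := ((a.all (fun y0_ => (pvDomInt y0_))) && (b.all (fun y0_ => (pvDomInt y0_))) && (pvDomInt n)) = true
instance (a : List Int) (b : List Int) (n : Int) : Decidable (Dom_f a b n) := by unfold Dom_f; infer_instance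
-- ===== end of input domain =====

-- B replaces A's descending matching sweep by a Hall-style closed form
-- (min over t of count-of-a-greater-than-b[t] plus t, capped at n, counts by binary search);
-- objective: alternative. Return value only — both Pythons sort a and b in place, the same side effect.

-- ===== PORT A =====
-- the while loop of A: state (i, j, c); fuel bounds the iteration count (j decreases each pass)
def loopA (as bs : List Int) : Nat → Int → Int → Int → Int
  | 0, _, _, c => c
  | fuel+1, i, j, c =>
    if i ≥ 0 ∧ j ≥ 0 then
      match PySem.List.pyGet? as i, PySem.List.pyGet? bs j with
      | some ai, some bj =>
        if ai > bj then loopA as bs fuel (i-1) (j-1) (c+1)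
        else loopA as bs fuel i (j-1) c
      | _, _ => c   -- IndexError in Python; excluded by Pre_f
    else c

def f (a : List Int) (b : List Int) (n : Int) : Int :=
  let as := PySem.List.sorted a (fun x => x) false
  let bs := PySem.List.sorted b (fun x => x) false
  loopA as bs n.toNat (n-1) (n-1) 0

-- ===== PORT B =====
-- B's inner while loop: binary search for the first index in [lo,hi) whose element exceeds bt;
-- fuel bounds the iteration count (hi - lo shrinks each pass)
def bsearch (as : List Int) (bt : Int) : Nat → Int → Int → Int
  | 0, lo, _ => lo
  | fuel+1, lo, hi =>
    if lo < hi then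
      let mid := PySem.Int.floordiv (lo + hi) 2
      match PySem.List.pyGet? as mid with
      | some am => if am ≤ bt then bsearch as bt fuel (mid+1) hi else bsearch as bt fuel lo mid
      | none => lo   -- IndexError in Python; excluded by Pre_f
    else lo

-- B's loop body for one t: best ↦ min with cnt + t
def stepB (as bs : List Int) (n : Int) (best t : Int) : Int :=
  match PySem.List.pyGet? bs t with
  | some bt =>
    let lo := bsearch as bt n.toNat 0 n
    let cnt := n - lo
    if cnt + t < best then cnt + t else best
  | none => best   -- IndexError in Python; excluded by Pre_f

def f_alt (a : List Int) (b : List Int) (n : Int) : Int :=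
  let as := PySem.List.sorted a (fun x => x) false
  let bs := PySem.List.sorted b (fun x => x) false
  if n ≤ 0 then 0
  else (PySem.List.pyRange 0 n 1).foldl (stepB as bs n) n

-- ===== PRECONDITION & SPEC =====
-- Pre_f: exactly the inputs where A raises no IndexError: either the loop never runs (n ≤ 0)
-- or both lists have at least n elements.
def Pre_f (a : List Int) (b : List Int) (n : Int) : Prop :=
  n ≤ 0 ∨ (n ≤ (a.length : Int) ∧ n ≤ (b.length : Int))
instance (a : List Int) (b : List Int) (n : Int) : Decidable (Pre_f a b n) := by
  unfold Pre_f; infer_instance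

def pvWitness_f : List Int × List Int × Int := ([2, 1], [1, 3], 2)

def Spec_f (a : List Int) (b : List Int) (n : Int) (out : Int) : Prop := out = f_alt a b n
instance (a : List Int) (b : List Int) (n : Int) (out : Int) : Decidable (Spec_f a b n out) := by
  unfold Spec_f; infer_instance

-- ===== CLAIM (what is proved, stated in full; the proofs are below) =====
def Claim_equal_f : Prop := ∀ (a : List Int) (b : List Int) (n : Int), Dom_f a b n → Pre_f a b n → Spec_f a b n (f a b n)

-- ===== LEMMAS AND PROOFS =====

-- front greedy on ascending lists (characterises A's loop after reversal)
def gagg : List Int → List Int → Int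
  | [], _ => 0
  | _ :: _, [] => 0
  | x :: xs, y :: ys => if x ≤ y then gagg xs (y :: ys) else gagg xs ys + 1

-- back greedy on descending lists (A's loop shape)
def hgg : List Int → List Int → Int
  | _, [] => 0
  | [], _ :: _ => 0
  | x :: xs, y :: ys => if y < x then hgg xs ys + 1 else hgg (x :: xs) ys

-- the Hall bound B computes: cntI xs v = #{x ∈ xs | v < x}, F xs ys = min(|ys|, min_t cnt(ys[t]) + t)
def cntI (xs : List Int) (v : Int) : Int := (xs.countP (fun x => decide (v < x)) : Int)

def F (xs : List Int) : List Int → Int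
  | [] => 0
  | y :: ys => min (cntI xs y) (1 + F xs ys)

@[simp] lemma gagg_nil_left (ys : List Int) : gagg [] ys = 0 := by cases ys <;> rfl
@[simp] lemma gagg_nil_right (xs : List Int) : gagg xs [] = 0 := by cases xs <;> rfl
@[simp] lemma hgg_nil_left (ys : List Int) : hgg [] ys = 0 := by cases ys <;> rfl
@[simp] lemma hgg_nil_right (xs : List Int) : hgg xs [] = 0 := by cases xs <;> rfl

-- an appended smallest a that beats nothing is never matched by the back greedy
lemma hgg_snoc_left (x : Int) : ∀ (vs us : List Int), (∀ v ∈ vs, x ≤ v) →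
    hgg (us ++ [x]) vs = hgg us vs := by
  intro vs
  induction vs with
  | nil => intro us _; simp
  | cons v vs ih =>
    intro us hle
    cases us with
    | nil =>
      have hxv : ¬ v < x := not_lt.mpr (hle v (by simp))
      simp only [List.nil_append, hgg, hxv, if_false, hgg_nil_left]
      have := ih [] (fun w hw => hle w (by simp [hw]))
      simpa using this
    | cons u us =>
      simp only [List.cons_append, hgg]
      by_cases hvu : v < u
      · simp only [hvu, if_true]
        rw [ih us (fun w hw => hle w (by simp [hw]))]
      · simp only [hvu, if_false]
        rw [← List.cons_append, ih (u :: us) (fun w hw => hle w (by simp [hw]))]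

-- appending a smallest b beaten by everything adds exactly one match
lemma hgg_snoc_both (x y : Int) (hyx : y < x) : ∀ (vs us : List Int), (∀ u ∈ us, y < u) →
    hgg (us ++ [x]) (vs ++ [y]) = hgg us vs + 1 := by
  intro vs
  induction vs with
  | nil =>
    intro us hus
    cases us with
    | nil => simp [hgg, hyx]
    | cons u us =>
      have hyu : y < u := hus u (by simp)
      simp [hgg, hyu]
  | cons v vs ih =>
    intro us hus
    cases us with
    | nil =>
      simp only [List.nil_append, List.cons_append, hgg]
      by_cases hvx : v < x
      · simp only [hvx, if_true, hgg_nil_left]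
      · simp only [hvx, if_false]
        have := ih [] (fun u hu => absurd hu (List.not_mem_nil))
        simpa using this
    | cons u us =>
      simp only [List.cons_append, hgg]
      by_cases hvu : v < u
      · simp only [hvu, if_true]
        rw [ih us (fun w hw => hus w (by simp [hw]))]
      · simp only [hvu, if_false]
        rw [← List.cons_append, ih (u :: us) hus]

-- the two greedy strategies agree on sorted inputs
lemma hgg_reverse_eq_gagg : ∀ (xs ys : List Int), xs.Pairwise (· ≤ ·) → ys.Pairwise (· ≤ ·) →
    hgg xs.reverse ys.reverse = gagg xs ys := by
  intro xs
  induction xs with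
  | nil => intro ys _ _; simp
  | cons x xs ih =>
    intro ys hxs hys
    cases ys with
    | nil => simp
    | cons y ys =>
      have hx : ∀ u ∈ xs, x ≤ u := (List.pairwise_cons.mp hxs).1
      have hy : ∀ v ∈ ys, y ≤ v := (List.pairwise_cons.mp hys).1
      simp only [List.reverse_cons, gagg]
      by_cases hxy : x ≤ y
      · simp only [hxy, if_true]
        rw [hgg_snoc_left x (ys.reverse ++ [y]) xs.reverse ?_]
        · rw [← List.reverse_cons]
          exact ih (y :: ys) (List.Pairwise.sublist (List.sublist_cons_self x xs) hxs) hys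
        · intro v hv
          rcases List.mem_append.mp hv with hv | hv
          · exact le_trans hxy (hy v (List.mem_reverse.mp hv))
          · simp only [List.mem_singleton] at hv; subst hv; exact hxy
      · simp only [hxy, if_false]
        have hyx : y < x := lt_of_not_ge hxy
        rw [hgg_snoc_both x y hyx ys.reverse xs.reverse ?_]
        · rw [ih ys (List.Pairwise.sublist (List.sublist_cons_self x xs) hxs)
              (List.Pairwise.sublist (List.sublist_cons_self y ys) hys)]
        · intro u hu
          exact lt_of_lt_of_le hyx (hx u (List.mem_reverse.mp hu))

-- A's loop computes the back greedy on the reversed prefixes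
lemma loopA_eq (as bs : List Int) : ∀ (fuel : Nat) (i j c : Int),
    i + 1 ≤ (as.length : Int) → j + 1 ≤ (bs.length : Int) → j + 1 ≤ (fuel : Int) →
    loopA as bs fuel i j c =
      c + hgg ((as.take (i + 1).toNat).reverse) ((bs.take (j + 1).toNat).reverse) := by
  intro fuel
  induction fuel with
  | zero =>
    intro i j c hi hj hf
    have hj0 : (j + 1).toNat = 0 := by omega
    simp [loopA, hj0]
  | succ fuel ih =>
    intro i j c hi hj hf
    by_cases hij : i ≥ 0 ∧ j ≥ 0
    · obtain ⟨hi0, hj0⟩ := hij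
      have hia : i.toNat < as.length := by omega
      have hjb : j.toNat < bs.length := by omega
      have hA : PySem.List.pyGet? as i = some as[i.toNat] :=
        PySem.List.pyGet?_eq_some_getElem as hi0 (by omega)
      have hB : PySem.List.pyGet? bs j = some bs[j.toNat] :=
        PySem.List.pyGet?_eq_some_getElem bs hj0 (by omega)
      have hti : as.take (i + 1).toNat = as.take i.toNat ++ [as[i.toNat]] := by
        have : (i + 1).toNat = i.toNat + 1 := by omega
        rw [this, List.take_add_one, List.getElem?_eq_getElem hia]
        rfl
      have htj : bs.take (j + 1).toNat = bs.take j.toNat ++ [bs[j.toNat]] := by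
        have : (j + 1).toNat = j.toNat + 1 := by omega
        rw [this, List.take_add_one, List.getElem?_eq_getElem hjb]
        rfl
      rw [show loopA as bs (fuel + 1) i j c =
            (if as[i.toNat] > bs[j.toNat] then loopA as bs fuel (i-1) (j-1) (c+1)
             else loopA as bs fuel i (j-1) c) by
        simp [loopA, hi0, hj0, hA, hB]]
      rw [hti, htj]
      simp only [List.reverse_append, List.reverse_cons, List.reverse_nil,
        List.nil_append, List.cons_append, hgg]
      by_cases hab : bs[j.toNat] < as[i.toNat]
      · simp only [hab, if_true]
        rw [ih (i-1) (j-1) (c+1) (by omega) (by omega) (by omega)]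
        have e1 : (i - 1 + 1).toNat = i.toNat := by omega
        have e2 : (j - 1 + 1).toNat = j.toNat := by omega
        rw [e1, e2]
        omega
      · simp only [hab, if_false]
        rw [ih i (j-1) c (by omega) (by omega) (by omega)]
        have e2 : (j - 1 + 1).toNat = j.toNat := by omega
        rw [e2, hti]
        simp only [List.reverse_append, List.reverse_cons, List.reverse_nil,
          List.nil_append, List.singleton_append]
    · have hj1 : (i + 1).toNat = 0 ∨ (j + 1).toNat = 0 := by omega
      rcases hj1 with h | h <;> simp [loopA, hij, h]

-- ===== the Hall-bound side =====

@[simp] lemma F_nil_left (ys : List Int) : F [] ys = 0 := by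
  induction ys with
  | nil => rfl
  | cons y ys ih => simp [F, ih, cntI]

lemma cntI_cons (x : Int) (xs : List Int) (v : Int) :
    cntI (x :: xs) v = cntI xs v + (if v < x then 1 else 0) := by
  by_cases h : v < x <;> simp [cntI, h]

lemma cntI_le (xs : List Int) (v : Int) : cntI xs v ≤ (xs.length : Int) := by
  unfold cntI
  exact_mod_cast List.countP_le_length

lemma cntI_all (xs : List Int) (v : Int) (h : ∀ u ∈ xs, v < u) :
    cntI xs v = (xs.length : Int) := by
  unfold cntI
  congr 1
  exact List.countP_eq_length.mpr (fun u hu => by simpa using h u hu)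

-- a head no element of ys needs to beat does not change the Hall bound
lemma F_cons_skip (x : Int) (xs : List Int) : ∀ (ys : List Int), (∀ w ∈ ys, x ≤ w) →
    F (x :: xs) ys = F xs ys := by
  intro ys
  induction ys with
  | nil => intro _; rfl
  | cons y ys ih =>
    intro h
    have hxy : ¬ y < x := not_lt.mpr (h y (by simp))
    simp only [F, cntI_cons, hxy, if_false, add_zero]
    rw [ih (fun w hw => h w (by simp [hw]))]

-- key step: capping at |xs| absorbs the extra head x when all of xs is ≥ x
lemma F_cap (x : Int) (xs : List Int) (hx : ∀ u ∈ xs, x ≤ u) :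
    ∀ (ys : List Int), ys.Pairwise (· ≤ ·) →
    min ((xs.length : Int)) (F (x :: xs) ys) = F xs ys := by
  intro ys
  induction ys with
  | nil =>
    intro _
    simp [F]
  | cons v ys ih =>
    intro hys
    have hv : ∀ w ∈ ys, v ≤ w := (List.pairwise_cons.mp hys).1
    by_cases hvx : v < x
    · have hall : ∀ u ∈ xs, v < u := fun u hu => lt_of_lt_of_le hvx (hx u hu)
      have hc : cntI xs v = (xs.length : Int) := cntI_all xs v hall
      have hcc : cntI (x :: xs) v = (xs.length : Int) + 1 := by
        rw [cntI_cons, hc, if_pos hvx]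
      have hih := ih (List.Pairwise.sublist (List.sublist_cons_self v ys) hys)
      simp only [F, hc, hcc]
      simp only [min_def] at hih ⊢
      split_ifs at hih ⊢ <;> omega
    · have hwall : ∀ w ∈ v :: ys, x ≤ w := by
        intro w hw
        rcases List.mem_cons.mp hw with h | h
        · subst h; exact not_lt.mp hvx
        · exact le_trans (not_lt.mp hvx) (hv w h)
      rw [F_cons_skip x xs (v :: ys) hwall]
      have hle : F xs (v :: ys) ≤ (xs.length : Int) := by
        have := cntI_le xs v
        simp only [F]
        omega
      omega
  
-- the greedy count equals the Hall bound on sorted lists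
lemma gagg_eq_F : ∀ (xs ys : List Int), xs.Pairwise (· ≤ ·) → ys.Pairwise (· ≤ ·) →
    gagg xs ys = F xs ys := by
  intro xs
  induction xs with
  | nil => intro ys _ _; simp
  | cons x xs ih =>
    intro ys hxs hys
    cases ys with
    | nil => simp [F]
    | cons y ys =>
      have hx : ∀ u ∈ xs, x ≤ u := (List.pairwise_cons.mp hxs).1
      have hy : ∀ v ∈ ys, y ≤ v := (List.pairwise_cons.mp hys).1
      have hxs' := (List.pairwise_cons.mp hxs).2
      have hys' := (List.pairwise_cons.mp hys).2
      simp only [gagg]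
      by_cases hxy : x ≤ y
      · simp only [hxy, if_true]
        rw [ih (y :: ys) hxs' hys]
        have hwall : ∀ w ∈ y :: ys, x ≤ w := by
          intro w hw
          rcases List.mem_cons.mp hw with h | h
          · subst h; exact hxy
          · exact le_trans hxy (hy w h)
        rw [F_cons_skip x xs (y :: ys) hwall]
      · simp only [hxy, if_false]
        have hyx : y < x := lt_of_not_ge hxy
        have hcc : cntI (x :: xs) y = (xs.length : Int) + 1 := by
          rw [cntI_cons, cntI_all xs y (fun u hu => lt_of_lt_of_le hyx (hx u hu)), if_pos hyx]
        rw [ih ys hxs' hys']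
        rw [show F (x :: xs) (y :: ys) = min ((xs.length : Int) + 1) (1 + F (x :: xs) ys) by
          simp [F, hcc]]
        have hcap := F_cap x xs hx ys hys'
        rw [← hcap]
        simp only [min_def]
        split_ifs <;> omega

lemma F_le_length (xs : List Int) : ∀ (ys : List Int), F xs ys ≤ (ys.length : Int) := by
  intro ys
  induction ys with
  | nil => simp [F]
  | cons y ys ih =>
    simp only [F, List.length_cons]
    have := min_le_right (cntI xs y) (1 + F xs ys)
    push_cast
    omega

-- B's binary search finds n minus the count of elements of the n-prefix exceeding bt
lemma bsearch_eq (as : List Int) (bt n : Int) (hs : as.Pairwise (· ≤ ·))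
    (hn : n ≤ (as.length : Int)) :
    ∀ (fuel : Nat) (lo hi : Int), 0 ≤ lo → lo ≤ hi → hi ≤ n → hi - lo ≤ (fuel : Int) →
    (∀ i : Nat, i < lo.toNat → ∀ (h : i < as.length), as[i] ≤ bt) →
    (∀ i : Nat, hi.toNat ≤ i → i < n.toNat → ∀ (h : i < as.length), bt < as[i]) →
    bsearch as bt fuel lo hi = n - cntI (as.take n.toNat) bt := by
  have hmono : ∀ (i j : Nat) (h1 : i < as.length) (h2 : j < as.length), i ≤ j → as[i] ≤ as[j] := by
    intro i j h1 h2 hij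
    rcases Nat.lt_or_ge i j with h | h
    · exact List.pairwise_iff_getElem.mp hs i j h1 h2 h
    · have : i = j := by omega
      subst this; exact le_refl _
  intro fuel
  induction fuel with
  | zero =>
    intro lo hi h0 hlh hhn hf hlo hhi
    have heq : lo = hi := by omega
    subst heq
    -- split the n-prefix at lo: everything before is ≤ bt, everything after is > bt
    have hln : (as.take n.toNat).length = n.toNat := by
      rw [List.length_take]; omega
    have hcnt : (as.take n.toNat).countP (fun x => decide (bt < x)) = n.toNat - lo.toNat := by
      rw [← List.take_append_drop lo.toNat (as.take n.toNat), List.countP_append]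
      have h1 : ((as.take n.toNat).take lo.toNat).countP (fun x => decide (bt < x)) = 0 := by
        apply List.countP_eq_zero.mpr
        intro x hx
        rcases List.mem_iff_getElem.mp hx with ⟨i, hi, hxe⟩
        have hil : i < lo.toNat := by
          have := hi; simp only [List.length_take, hln] at this; omega
        have hias : i < as.length := by omega
        have : x = as[i] := by
          rw [← hxe, List.getElem_take, List.getElem_take]
        subst this
        simpa using not_lt.mpr (hlo i hil hias)
      have h2 : ((as.take n.toNat).drop lo.toNat).countP (fun x => decide (bt < x)) =
          ((as.take n.toNat).drop lo.toNat).length := by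
        apply List.countP_eq_length.mpr
        intro x hx
        rcases List.mem_iff_getElem.mp hx with ⟨i, hi, hxe⟩
        have hil : lo.toNat + i < n.toNat := by
          have := hi; simp only [List.length_drop, hln] at this; omega
        have hias : lo.toNat + i < as.length := by omega
        have : x = as[lo.toNat + i] := by
          rw [← hxe, List.getElem_drop, List.getElem_take]
        subst this
        simpa using hhi (lo.toNat + i) (by omega) hil hias
      rw [h1, h2, List.length_drop, hln]
      omega
    show lo = n - cntI (as.take n.toNat) bt
    rw [cntI, hcnt]
    omega
  | succ fuel ih =>
    intro lo hi h0 hlh hhn hf hlo hhi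
    by_cases hlt : lo < hi
    · have hmid : PySem.Int.floordiv (lo + hi) 2 = (lo + hi) / 2 :=
        PySem.Int.floordiv_eq_ediv_of_pos (by omega)
      have hb1 : lo ≤ (lo + hi) / 2 := by omega
      have hb2 : (lo + hi) / 2 < hi := by omega
      have hmia : ((lo + hi) / 2).toNat < as.length := by omega
      have hG : PySem.List.pyGet? as ((lo + hi) / 2) = some as[((lo + hi) / 2).toNat] :=
        PySem.List.pyGet?_eq_some_getElem as (by omega) (by omega)
      rw [show bsearch as bt (fuel + 1) lo hi =
            (if as[((lo + hi) / 2).toNat] ≤ bt then bsearch as bt fuel ((lo + hi) / 2 + 1) hi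
             else bsearch as bt fuel lo ((lo + hi) / 2)) by
        simp only [bsearch, if_pos hlt, hmid, hG]]
      by_cases ham : as[((lo + hi) / 2).toNat] ≤ bt
      · simp only [ham, if_true]
        apply ih ((lo + hi) / 2 + 1) hi (by omega) (by omega) hhn (by omega)
        · intro i hi1 hias
          have : i ≤ ((lo + hi) / 2).toNat := by omega
          exact le_trans (hmono i ((lo + hi) / 2).toNat hias hmia this) ham
        · exact hhi
      · simp only [ham, if_false]
        apply ih lo ((lo + hi) / 2) h0 (by omega) (by omega) (by omega) hlo
        intro i hi1 hi2 hias
        have hbm : bt < as[((lo + hi) / 2).toNat] := lt_of_not_ge ham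
        exact lt_of_lt_of_le hbm (hmono ((lo + hi) / 2).toNat i hmia hias (by omega))
    · have heq : lo = hi := by omega
      rw [show bsearch as bt (fuel + 1) lo hi = lo by simp [bsearch, hlt]]
      subst heq
      -- same splitting argument as the fuel-0 base case
      have hln : (as.take n.toNat).length = n.toNat := by
        rw [List.length_take]; omega
      have hcnt : (as.take n.toNat).countP (fun x => decide (bt < x)) = n.toNat - lo.toNat := by
        rw [← List.take_append_drop lo.toNat (as.take n.toNat), List.countP_append]
        have h1 : ((as.take n.toNat).take lo.toNat).countP (fun x => decide (bt < x)) = 0 := by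
          apply List.countP_eq_zero.mpr
          intro x hx
          rcases List.mem_iff_getElem.mp hx with ⟨i, hi2, hxe⟩
          have hil : i < lo.toNat := by
            have := hi2; simp only [List.length_take, hln] at this; omega
          have hias : i < as.length := by omega
          have : x = as[i] := by rw [← hxe, List.getElem_take, List.getElem_take]
          subst this
          simpa using not_lt.mpr (hlo i hil hias)
        have h2 : ((as.take n.toNat).drop lo.toNat).countP (fun x => decide (bt < x)) =
            ((as.take n.toNat).drop lo.toNat).length := by
          apply List.countP_eq_length.mpr
          intro x hx
          rcases List.mem_iff_getElem.mp hx with ⟨i, hi2, hxe⟩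
          have hil : lo.toNat + i < n.toNat := by
            have := hi2; simp only [List.length_drop, hln] at this; omega
          have hias : lo.toNat + i < as.length := by omega
          have : x = as[lo.toNat + i] := by rw [← hxe, List.getElem_drop, List.getElem_take]
          subst this
          simpa using hhi (lo.toNat + i) (by omega) hil hias
        rw [h1, h2, List.length_drop, hln]
        omega
      rw [cntI, hcnt]
      omega

-- B's fold computes the capped Hall bound over the suffix of b's prefix
lemma foldC (as bs : List Int) (n : Int) (hs : as.Pairwise (· ≤ ·))
    (hna : n ≤ (as.length : Int)) (hnb : n ≤ (bs.length : Int)) :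
    ∀ (k : Nat) (j best : Int), j = n - (k : Int) → 0 ≤ j → best ≤ n →
    (PySem.List.pyRange j n 1).foldl (stepB as bs n) best
      = min best (j + F (as.take n.toNat) ((bs.take n.toNat).drop j.toNat)) := by
  intro k
  induction k with
  | zero =>
    intro j best hjk hj0 hbn
    have hjn : j = n := by omega
    subst hjn
    have hd : (bs.take j.toNat).drop j.toNat = [] := by
      apply List.drop_eq_nil_of_le
      simp [List.length_take]
    rw [PySem.List.pyRange_one_eq_nil (le_refl j)]
    simp only [List.foldl_nil, hd, F]
    omega
  | succ k ih =>
    intro j best hjk hj0 hbn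
    have hjn : j < n := by omega
    have hjb : j.toNat < bs.length := by omega
    have hB : PySem.List.pyGet? bs j = some bs[j.toNat] :=
      PySem.List.pyGet?_eq_some_getElem bs hj0 (by omega)
    have hbs : bsearch as bs[j.toNat] n.toNat 0 n = n - cntI (as.take n.toNat) bs[j.toNat] := by
      apply bsearch_eq as bs[j.toNat] n hs hna n.toNat 0 n (le_refl 0) (by omega) (le_refl n)
        (by omega)
      · intro i hi _; omega
      · intro i hi1 hi2 _; omega
    have hstep : stepB as bs n best j =
        (if cntI (as.take n.toNat) bs[j.toNat] + j < best
         then cntI (as.take n.toNat) bs[j.toNat] + j else best) := by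
      simp only [stepB, hB, hbs]
      have : n - (n - cntI (as.take n.toNat) bs[j.toNat]) = cntI (as.take n.toNat) bs[j.toNat] := by
        ring
      rw [this]
    have hjtn : j.toNat < (bs.take n.toNat).length := by
      simp only [List.length_take]; omega
    have hdb : (bs.take n.toNat).drop j.toNat =
        bs[j.toNat] :: (bs.take n.toNat).drop (j.toNat + 1) := by
      rw [List.drop_eq_getElem_cons hjtn, List.getElem_take]
    rw [PySem.List.pyRange_one_cons hjn, List.foldl_cons, hstep]
    set c := cntI (as.take n.toNat) bs[j.toNat] with hc
    set Fr := F (as.take n.toNat) ((bs.take n.toNat).drop (j.toNat + 1)) with hFr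
    have e2 : (j + 1).toNat = j.toNat + 1 := by omega
    by_cases hcb : c + j < best
    · simp only [hcb, if_true]
      rw [ih (j + 1) (c + j) (by omega) (by omega) (by omega)]
      rw [e2, ← hFr, hdb, F, ← hc, ← hFr]
      simp only [min_def]
      split_ifs <;> omega
    · simp only [hcb, if_false]
      rw [ih (j + 1) best (by omega) (by omega) hbn]
      rw [e2, ← hFr, hdb, F, ← hc, ← hFr]
      simp only [min_def]
      split_ifs <;> omega

-- ===== VERDICT (by name: the statement is the Claim_ definition above) =====
theorem f_spec : Claim_equal_f := by
  unfold Claim_equal_f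
  intro a b n _ hpre
  unfold Spec_f f f_alt
  by_cases hn : n ≤ 0
  · have h0 : n.toNat = 0 := by omega
    simp [h0, hn, loopA]
  · simp only [if_neg hn]
    have hla : n ≤ ((PySem.List.sorted a (fun x => x) false).length : Int) := by
      rw [PySem.List.length_sorted]
      rcases hpre with h | ⟨h1, _⟩ <;> omega
    have hlb : n ≤ ((PySem.List.sorted b (fun x => x) false).length : Int) := by
      rw [PySem.List.length_sorted]
      rcases hpre with h | ⟨_, h2⟩ <;> omega
    set as := PySem.List.sorted a (fun x => x) false with has
    set bs := PySem.List.sorted b (fun x => x) false with hbs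
    have hsa : as.Pairwise (· ≤ ·) := PySem.List.sorted_pairwise a (fun x => x)
    have hsb : bs.Pairwise (· ≤ ·) := PySem.List.sorted_pairwise b (fun x => x)
    rw [loopA_eq as bs n.toNat (n - 1) (n - 1) 0 (by omega) (by omega) (by omega)]
    have e1 : (n - 1 + 1).toNat = n.toNat := by omega
    rw [e1, zero_add]
    rw [hgg_reverse_eq_gagg (as.take n.toNat) (bs.take n.toNat)
      (List.Pairwise.sublist (List.take_sublist _ _) hsa)
      (List.Pairwise.sublist (List.take_sublist _ _) hsb)]
    rw [foldC as bs n hsa hla hlb n.toNat 0 n (by omega) (by omega) (le_refl n)]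
    simp only [Int.toNat_zero, List.drop_zero, zero_add]
    rw [gagg_eq_F (as.take n.toNat) (bs.take n.toNat)
      (List.Pairwise.sublist (List.take_sublist _ _) hsa)
      (List.Pairwise.sublist (List.take_sublist _ _) hsb)]
    have hFle : F (as.take n.toNat) (bs.take n.toNat) ≤ n := by
      have := F_le_length (as.take n.toNat) (bs.take n.toNat)
      have hlen : ((bs.take n.toNat).length : Int) = n := by
        rw [List.length_take]
        omega
      omega
    omega
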